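-- pv_equiv track=rewrite | github.com/lsst-sqre/sasquatch | src/sasquatch/line_protocol.py | _find_unquoted_separator
-- ===== SOURCE A (Python) =====
-- def _find_unquoted_separator(text: str, separator: str) -> int:
--     """Find the first unescaped separator outside quoted strings."""
--     escaped = False
--     in_quotes = False
--
--     for index, char in enumerate(text):
--         if escaped:
--             escaped = False
--             continue
--         if char == "\\":
--             escaped = True
--             continue
--         if char == '"':
--             in_quotes = not in_quotes
--             continue
--         if char == separator and not in_quotes:
--             return index
--
--     return -1
-- ===== SOURCE B (Python) =====
-- def _find_unquoted_separator(text: str, separator: str) -> int: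
--     """Find the first unescaped separator outside quoted strings.
--
--     Two-stage algorithm: first a run-length pass over backslash runs computes
--     the list of "active" (index, char) pairs -- characters that are neither
--     backslashes nor escaped (a run of k backslashes consumes itself plus, when
--     k is odd, the following character).  Then a quote-tracking scan over the
--     active characters returns the first separator seen outside quotes.
--     """
--     active = []
--     i = 0
--     n = len(text)
--     while i < n:
--         if text[i] == "\\":
--             j = i
--             while j < n and text[j] == "\\":
--                 j += 1
--             run = j - i
--             i = j + run % 2  # an odd run also escapes the next character
--         else:
--             active.append((i, text[i]))
--             i += 1
--
--     in_quotes = False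
--     for index, char in active:
--         if char == '"':
--             in_quotes = not in_quotes
--         elif char == separator and not in_quotes:
--             return index
--     return -1
-- ===== Notes on version B (the rewrite author's own statement) =====
-- stated objective: alternative
-- what changed: Replaces the one-pass escaped-flag state machine by a two-stage algorithm: a run-length pass over backslash runs first builds the list of active (index, char) pairs (a run of k backslashes consumes itself and, when k is odd, the next character), then a quote-tracking scan over that list returns the first separator outside quotes.
import Mathlib
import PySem

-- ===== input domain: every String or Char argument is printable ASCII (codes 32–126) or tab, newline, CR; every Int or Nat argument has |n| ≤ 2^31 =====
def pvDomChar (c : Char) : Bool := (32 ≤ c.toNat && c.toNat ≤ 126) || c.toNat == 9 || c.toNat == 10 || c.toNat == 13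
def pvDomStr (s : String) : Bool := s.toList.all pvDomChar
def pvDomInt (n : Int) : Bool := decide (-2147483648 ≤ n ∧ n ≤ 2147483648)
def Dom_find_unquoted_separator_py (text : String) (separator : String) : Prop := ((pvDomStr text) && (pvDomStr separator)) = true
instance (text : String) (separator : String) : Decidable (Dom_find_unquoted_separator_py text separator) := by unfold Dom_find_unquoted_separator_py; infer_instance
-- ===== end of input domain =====

-- B replaces A's one-pass escaped-flag state machine by a two-stage algorithm:
-- a run-length pass over backslash runs builds the active (index, char) pairs,
-- then a quote-tracking scan over them (objective: alternative).


-- ===== PORT A =====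
-- loop state of A: escaped flag, in_quotes flag, running index (Python's enumerate)
def fusGoA (sep : String) : List Char → Bool → Bool → Int → Int
  | [], _, _, _ => -1
  | c :: rest, escaped, in_quotes, index =>
    if escaped then fusGoA sep rest false in_quotes (index + 1)
    else if c = '\\' then fusGoA sep rest true in_quotes (index + 1)
    else if c = '"' then fusGoA sep rest escaped (!in_quotes) (index + 1)
    else if String.ofList [c] = sep && !in_quotes then index
    else fusGoA sep rest escaped in_quotes (index + 1)

def find_unquoted_separator_py (text : String) (separator : String) : Int :=
  fusGoA separator text.toList false false 0

-- ===== PORT B =====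
-- stage-1 inner while loop: length of the leading backslash run
def fusRun : List Char → Nat
  | [] => 0
  | c :: rest => if c = '\\' then fusRun rest + 1 else 0

-- stage 1: the active (index, char) pairs; a backslash run of length k
-- consumes k + k % 2 characters (itself plus, if k is odd, the next char)
def fusActive : List Char → Int → List (Int × Char)
  | [], _ => []
  | c :: rest, i =>
    if h : c = '\\' then
      fusActive ((c :: rest).drop (fusRun (c :: rest) + fusRun (c :: rest) % 2))
        (i + ((fusRun (c :: rest) + fusRun (c :: rest) % 2 : Nat) : Int))
    else (i, c) :: fusActive rest (i + 1)
termination_by cs _ => cs.length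
decreasing_by
  · have hk : 1 ≤ fusRun (c :: rest) := by simp [fusRun, h]
    rw [List.length_drop]
    simp only [List.length_cons]
    omega
  · simp

-- stage 2: quote-tracking scan over the active pairs
def fusScan (sep : String) : List (Int × Char) → Bool → Int
  | [], _ => -1
  | (index, c) :: rest, in_quotes =>
    if c = '"' then fusScan sep rest (!in_quotes)
    else if String.ofList [c] = sep && !in_quotes then index
    else fusScan sep rest in_quotes

def find_unquoted_separator_py_alt (text : String) (separator : String) : Int :=
  fusScan separator (fusActive text.toList 0) false

-- ===== PRECONDITION & SPEC =====
def Spec_find_unquoted_separator_py (text : String) (separator : String) (out : Int) : Prop := out = find_unquoted_separator_py_alt text separator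
instance (text : String) (separator : String) (out : Int) : Decidable (Spec_find_unquoted_separator_py text separator out) := by unfold Spec_find_unquoted_separator_py; infer_instance

-- ===== CLAIM =====
def Claim_equal_find_unquoted_separator_py : Prop := ∀ (text : String) (separator : String), Dom_find_unquoted_separator_py text separator → Spec_find_unquoted_separator_py text separator (find_unquoted_separator_py text separator)

-- ===== LEMMAS AND PROOFS =====
theorem fusRun_bs (t : List Char) : fusRun ('\\' :: t) = fusRun t + 1 := by
  simp [fusRun]

theorem fusRun_ne (d : Char) (t : List Char) (hd : d ≠ '\\') : fusRun (d :: t) = 0 := by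
  simp [fusRun, hd]

-- a leading pair of backslashes is consumed whole: the run shrinks by 2, parity unchanged
theorem fusActive_bb (t : List Char) (i : Int) :
    fusActive ('\\' :: '\\' :: t) i = fusActive t (i + 2) := by
  have hk : fusRun ('\\' :: '\\' :: t) = fusRun t + 2 := by
    rw [fusRun_bs, fusRun_bs]
  rw [fusActive]
  rw [dif_pos rfl]
  match t with
  | [] =>
    have h2 : fusRun ['\\', '\\'] = 2 := rfl
    rw [h2]
    norm_num
  | d :: t' =>
    by_cases hd : d = '\\'
    · subst hd
      conv_rhs => rw [fusActive, dif_pos rfl]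
      have e : fusRun ('\\' :: '\\' :: '\\' :: t') + fusRun ('\\' :: '\\' :: '\\' :: t') % 2
          = (fusRun ('\\' :: t') + fusRun ('\\' :: t') % 2) + 2 := by omega
      rw [e, List.drop_succ_cons, List.drop_succ_cons]
      congr 1
      push_cast
      ring
    · have h0 : fusRun (d :: t') = 0 := fusRun_ne d t' hd
      rw [h0] at hk
      rw [hk, List.drop_succ_cons, List.drop_succ_cons]
      norm_num

-- a single backslash (not followed by another) consumes itself and the next character
theorem fusActive_bd (d : Char) (t : List Char) (i : Int) (hd : d ≠ '\\') :
    fusActive ('\\' :: d :: t) i = fusActive t (i + 2) := by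
  have hk : fusRun ('\\' :: d :: t) = 1 := by rw [fusRun_bs, fusRun_ne d t hd]
  rw [fusActive, dif_pos rfl, hk, List.drop_succ_cons, List.drop_succ_cons]
  norm_num

theorem fusActive_b_nil (i : Int) : fusActive ['\\'] i = fusActive [] (i + 2) := by
  have h1 : fusRun ['\\'] = 1 := rfl
  conv_lhs => rw [fusActive]
  rw [dif_pos rfl, h1, List.drop_succ_cons]
  norm_num

theorem fusActive_ne (c : Char) (t : List Char) (i : Int) (hc : c ≠ '\\') :
    fusActive (c :: t) i = (i, c) :: fusActive t (i + 1) := by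
  rw [fusActive, dif_neg hc]

-- A (with escaped = false) agrees with B's scan over the active pairs
theorem fus_agree (sep : String) : ∀ (n : Nat) (cs : List Char), cs.length ≤ n →
    ∀ (q : Bool) (i : Int), fusGoA sep cs false q i = fusScan sep (fusActive cs i) q := by
  intro n
  induction n with
  | zero =>
    intro cs h q i
    have : cs = [] := by cases cs <;> simp_all
    subst this; simp [fusGoA, fusActive, fusScan]
  | succ n ih =>
    intro cs h q i
    match cs with
    | [] => simp [fusGoA, fusActive, fusScan]
    | c :: rest =>
      by_cases hb : c = '\\'
      · subst hb
        cases rest with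
        | nil =>
          rw [fusActive_b_nil]
          simp [fusGoA, fusActive, fusScan]
        | cons d rest' =>
          have hA : fusGoA sep ('\\' :: d :: rest') false q i
              = fusGoA sep rest' false q (i + 1 + 1) := by
            simp [fusGoA]
          rw [hA, show i + 1 + 1 = i + 2 by ring]
          by_cases hd : d = '\\'
          · subst hd
            rw [fusActive_bb]
            exact ih rest' (by simp at h ⊢; omega) q (i + 2)
          · rw [fusActive_bd d rest' i hd]
            exact ih rest' (by simp at h ⊢; omega) q (i + 2)
      · rw [fusActive_ne c rest i hb]
        by_cases hq : c = '"'
        · subst hq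
          have hB : fusScan sep ((i, '"') :: fusActive rest (i + 1)) q
              = fusScan sep (fusActive rest (i + 1)) (!q) := by simp [fusScan]
          rw [hB]
          simp only [fusGoA, if_neg hb, Bool.false_eq_true, if_false, if_true]
          exact ih rest (by simp at h ⊢; omega) (!q) (i + 1)
        · by_cases hs : (String.ofList [c] = sep && !q) = true
          · simp [fusGoA, fusScan, hb, hq, hs]
          · simp only [Bool.not_eq_true] at hs
            have hB : fusScan sep ((i, c) :: fusActive rest (i + 1)) q
                = fusScan sep (fusActive rest (i + 1)) q := by
              simp [fusScan, hq, hs]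
            rw [hB]
            simp only [fusGoA, if_neg hb, if_neg hq, hs, Bool.false_eq_true, if_false]
            exact ih rest (by simp at h ⊢; omega) q (i + 1)

-- ===== VERDICT =====
theorem find_unquoted_separator_py_spec : Claim_equal_find_unquoted_separator_py := by
  intro text separator _
  unfold Spec_find_unquoted_separator_py find_unquoted_separator_py find_unquoted_separator_py_alt
  exact fus_agree separator text.toList.length text.toList le_rfl false 0
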